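-- pv_equiv track=rewrite | github.com/Lerc/JustSomeSkills | svd-interpreter/scripts/encode_value.py | format_binary
-- ===== SOURCE A (Python) =====
-- def format_binary(value, width):
--     """Format value as binary with underscores every 4 bits for readability."""
--     binary = format(value, f'0{width}b')
--     result = []
--     for i, bit in enumerate(reversed(binary)):
--         if i > 0 and i % 4 == 0:
--             result.append('_')
--         result.append(bit)
--     return ''.join(reversed(result))
-- ===== SOURCE B (Python) =====
-- def format_binary(value, width):
--     """Format value as binary with underscores every 4 bits for readability."""
--     binary = format(value, f'0{width}b')
--     rb = binary[::-1]
--     chunks = [rb[i:i + 4][::-1] for i in range(0, len(rb), 4)]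
--     return '_'.join(reversed(chunks))
-- ===== Notes on version B (the rewrite author's own statement) =====
-- stated objective: simpler
-- what changed: Replaces the per-bit enumerate/modulo loop that interleaves '_' characters (plus a final reversal of the character list) with right-aligned slicing of the binary string into 4-character chunks joined by '_'.
import Mathlib
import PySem

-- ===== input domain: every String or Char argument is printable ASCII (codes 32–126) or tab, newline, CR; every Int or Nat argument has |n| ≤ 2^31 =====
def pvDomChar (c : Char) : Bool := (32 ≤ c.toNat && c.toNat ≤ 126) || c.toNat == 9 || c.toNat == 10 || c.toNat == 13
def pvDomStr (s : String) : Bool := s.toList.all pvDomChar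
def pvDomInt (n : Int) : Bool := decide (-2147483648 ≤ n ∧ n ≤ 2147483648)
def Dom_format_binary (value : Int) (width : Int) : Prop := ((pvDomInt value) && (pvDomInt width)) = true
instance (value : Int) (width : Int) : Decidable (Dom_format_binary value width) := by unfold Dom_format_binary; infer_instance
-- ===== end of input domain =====

-- B re-decomposes the per-bit loop into right-aligned 4-character chunking plus one join (objective: simpler).

-- ===== PORT A =====
-- the 'for i, bit in enumerate(reversed(binary))' loop, with its if/append bodies verbatim
def pvALoop : Nat → List Char → List Char → List Char
  | _, acc, [] => acc
  | i, acc, bit :: rest =>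
      pvALoop (i + 1) ((if 0 < i ∧ i % 4 = 0 then acc ++ ['_'] else acc) ++ [bit]) rest

def format_binary (value : Int) (width : Int) : String :=
  -- format(value, f'0{width}b') = binary digits of value zero-padded to width (sign in front)
  let binary := PySem.Str.zfill (PySem.Int.toBin value) width
  String.mk ((pvALoop 0 [] binary.toList.reverse).reverse)

-- ===== PORT B =====
-- chunks = [rb[i:i+4][::-1] for i in range(0, len(rb), 4)] on the reversed digit list
def pvChunk4 : List Char → List (List Char)
  | [] => []
  | a :: rest => ((a :: rest).take 4).reverse :: pvChunk4 ((a :: rest).drop 4)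
termination_by l => l.length
decreasing_by simp [List.length_drop]

def format_binary_alt (value : Int) (width : Int) : String :=
  let binary := PySem.Str.zfill (PySem.Int.toBin value) width
  let rb := binary.toList.reverse
  String.mk (PySem.Chars.join ['_'] (pvChunk4 rb).reverse)

-- ===== PRECONDITION & SPEC =====
-- Pre_ excludes width < 0, on which A's format spec f'0{width}b' raises ValueError.
def Pre_format_binary (value : Int) (width : Int) : Prop := 0 ≤ width
instance (value : Int) (width : Int) : Decidable (Pre_format_binary value width) := by unfold Pre_format_binary; infer_instance
def pvWitness_format_binary : Int × Int := (300, 12)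

def Spec_format_binary (value : Int) (width : Int) (out : String) : Prop := out = format_binary_alt value width
instance (value : Int) (width : Int) (out : String) : Decidable (Spec_format_binary value width out) := by unfold Spec_format_binary; infer_instance

-- ===== CLAIM (what is proved, stated in full; the proofs are below) =====
def Claim_equal_format_binary : Prop := ∀ (value : Int) (width : Int), Dom_format_binary value width → Pre_format_binary value width → Spec_format_binary value width (format_binary value width)

-- ===== LEMMAS AND PROOFS =====

theorem pvALoop_acc (l : List Char) : ∀ (i : Nat) (acc : List Char),
    pvALoop i acc l = acc ++ pvALoop i [] l := by
  induction l with
  | nil => intro i acc; simp [pvALoop]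
  | cons b rest ih =>
      intro i acc
      simp only [pvALoop]
      rw [ih (i + 1), ih (i + 1) ((if 0 < i ∧ i % 4 = 0 then ([] : List Char) ++ ['_'] else []) ++ [b])]
      by_cases h : 0 < i ∧ i % 4 = 0 <;> simp [h]

theorem pvALoop_congr (l : List Char) : ∀ (i j : Nat) (acc : List Char),
    i % 4 = j % 4 → (i = 0 ↔ j = 0) → pvALoop i acc l = pvALoop j acc l := by
  induction l with
  | nil => intro i j acc _ _; rfl
  | cons b rest ih =>
      intro i j acc h1 h2
      simp only [pvALoop]
      have hc : (0 < i ∧ i % 4 = 0) ↔ (0 < j ∧ j % 4 = 0) := by omega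
      rw [if_congr hc rfl rfl, ih (i + 1) (j + 1) _ (by omega) (by omega)]

theorem pvALoop_step0 (l : List Char) :
    pvALoop 0 [] l = l.take 4 ++ pvALoop 4 [] (l.drop 4) := by
  match l with
  | [] => simp [pvALoop]
  | [a] => simp [pvALoop]
  | [a, b] => simp [pvALoop]
  | [a, b, c] => simp [pvALoop]
  | a :: b :: c :: d :: rest =>
      simp only [pvALoop, List.take, List.drop]
      rw [pvALoop_acc rest 4]
      norm_num

theorem pvALoop_step4 (l : List Char) (hl : l ≠ []) :
    pvALoop 4 [] l = '_' :: (l.take 4 ++ pvALoop 4 [] (l.drop 4)) := by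
  match l with
  | [a] => simp [pvALoop]
  | [a, b] => simp [pvALoop]
  | [a, b, c] => simp [pvALoop]
  | a :: b :: c :: d :: rest =>
      simp only [pvALoop, List.take, List.drop]
      rw [pvALoop_acc rest 8, pvALoop_congr rest 8 4 [] (by norm_num) (by omega)]
      norm_num

theorem pvChunk4_nil : pvChunk4 [] = [] := by rw [pvChunk4.eq_def]

theorem pvChunk4_cons (a : Char) (rest : List Char) :
    pvChunk4 (a :: rest) = ((a :: rest).take 4).reverse :: pvChunk4 ((a :: rest).drop 4) := by
  rw [pvChunk4.eq_def]

theorem pvChunk4_ne_nil (l : List Char) (hl : l ≠ []) : pvChunk4 l ≠ [] := by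
  match l with
  | a :: rest => rw [pvChunk4_cons]; simp

theorem pvJoin_append_singleton (M : List (List Char)) (a : List Char) (hM : M ≠ []) :
    PySem.Chars.join ['_'] (M ++ [a]) = PySem.Chars.join ['_'] M ++ '_' :: a := by
  induction M with
  | nil => exact absurd rfl hM
  | cons x M ih =>
      match M with
      | [] =>
          rw [List.cons_append, List.nil_append, PySem.Chars.join_cons_cons,
            PySem.Chars.join_singleton, PySem.Chars.join_singleton]
          simp
      | y :: M' =>
          have h1 : (x :: y :: M') ++ [a] = x :: ((y :: M') ++ [a]) := rfl
          have h2 : (y :: M') ++ [a] = y :: (M' ++ [a]) := rfl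
          rw [h1, h2, PySem.Chars.join_cons_cons, ← h2, ih (by simp),
            PySem.Chars.join_cons_cons]
          simp

theorem pv_main (r : List Char) :
    (pvALoop 0 [] r).reverse = PySem.Chars.join ['_'] (pvChunk4 r).reverse ∧
    (pvALoop 4 [] r).reverse =
      (if r = [] then [] else PySem.Chars.join ['_'] (pvChunk4 r).reverse ++ ['_']) := by
  induction hn : r.length using Nat.strong_induction_on generalizing r with
  | _ n ih =>
    match r with
    | [] => simp [pvALoop, pvChunk4_nil, PySem.Chars.join_nil]
    | a :: rest =>
      have hlen : ((a :: rest).drop 4).length < n := by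
        simp [List.length_drop] at *; omega
      obtain ⟨ih0, ih4⟩ := ih _ hlen _ rfl
      by_cases hd : (a :: rest).drop 4 = []
      · -- at most 4 chars: a single chunk on both sides
        have ht : (a :: rest).take 4 = a :: rest :=
          List.take_of_length_le (by simpa using List.drop_eq_nil_iff.mp hd)
        have hchunk : pvChunk4 (a :: rest) = [(a :: rest).reverse] := by
          rw [pvChunk4_cons, hd, pvChunk4_nil, ht]
        constructor
        · rw [pvALoop_step0, hd, hchunk, ht]
          simp [pvALoop, PySem.Chars.join_singleton]
        · rw [pvALoop_step4 _ (by simp), hd, hchunk, ht]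
          simp [pvALoop, PySem.Chars.join_singleton]
      · rw [if_neg hd] at ih4
        have hjoin : PySem.Chars.join ['_'] (pvChunk4 (a :: rest)).reverse =
            PySem.Chars.join ['_'] (pvChunk4 ((a :: rest).drop 4)).reverse ++
              '_' :: ((a :: rest).take 4).reverse := by
          rw [pvChunk4_cons, List.reverse_cons,
            pvJoin_append_singleton _ _ (by simpa using pvChunk4_ne_nil _ hd)]
        constructor
        · rw [pvALoop_step0, List.reverse_append, ih4, hjoin]; simp
        · rw [pvALoop_step4 _ (by simp), if_neg (by simp), List.reverse_cons,
            List.reverse_append, ih4, hjoin]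
          simp

-- ===== VERDICT (by name: the statement is the Claim_ definition above) =====
theorem format_binary_spec : Claim_equal_format_binary := by
  intro value width _ _
  unfold Spec_format_binary format_binary format_binary_alt
  exact congrArg String.mk (pv_main _).1
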